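-- pv_equiv track=rewrite | github.com/YangSeungYeol/TIL | BaekJoon/파이썬 알고리즘공부/2606_Virus.py | bfs
-- ===== SOURCE A (Python) =====
-- from collections import deque
--
-- def bfs(graph, root):
--     visited = []
--     queue = deque([1])
--
--     while queue:
--         n = queue.popleft()
--         if n not in visited:
--             visited.append(n)
--             if n in graph:
--                 temp = list(set(graph[n]) - set(visited))
--                 temp.sort()
--                 queue += temp
--     return len(visited)-1
-- ===== SOURCE B (Python) =====
-- def bfs(graph, root):
--     visited = {1}
--     stack = [1]
--     while stack:
--         n = stack.pop()
--         for m in graph.get(n, ()):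
--             if m not in visited:
--                 visited.add(m)
--                 stack.append(m)
--     return len(visited) - 1
-- ===== Notes on version B (the rewrite author's own statement) =====
-- stated objective: alternative
-- what changed: Replaces A's BFS over a visited LIST (linear membership scan per dequeue plus a set-difference and sort of the neighbour list at every visit) by a stack DFS that checks a hash set before pushing; asymptotically O(V+E) vs A's O(V*E), though a timing run's random graphs (tiny reachable component) show no measurable difference.
import Mathlib
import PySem

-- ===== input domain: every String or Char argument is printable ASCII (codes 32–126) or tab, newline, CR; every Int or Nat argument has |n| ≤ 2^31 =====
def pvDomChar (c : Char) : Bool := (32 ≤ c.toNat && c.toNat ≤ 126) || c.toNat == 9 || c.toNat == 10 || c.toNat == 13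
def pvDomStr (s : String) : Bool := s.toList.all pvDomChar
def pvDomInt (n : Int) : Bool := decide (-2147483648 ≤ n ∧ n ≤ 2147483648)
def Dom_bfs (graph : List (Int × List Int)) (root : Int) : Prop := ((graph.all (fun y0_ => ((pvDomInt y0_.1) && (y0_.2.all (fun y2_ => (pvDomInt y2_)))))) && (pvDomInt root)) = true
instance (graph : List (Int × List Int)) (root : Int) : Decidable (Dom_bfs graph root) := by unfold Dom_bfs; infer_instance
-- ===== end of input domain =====

-- B replaces A's visited-LIST BFS (linear membership scan, per-node set-difference + sort)
-- by a stack DFS with a visited set checked before pushing (a different traversal maintaining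
-- different state; the visit count is traversal-order independent). Return value only.

-- shared helper: dict lookup, first matching key (exact for Python dicts, whose keys are unique)
def pvAdj : List (Int × List Int) → Int → Option (List Int)
  | [], _ => none
  | (k, l) :: rest, n => if k == n then some l else pvAdj rest n

-- 1 together with every listed neighbour: a finite superset of every node either traversal touches
def pvAllNodes (graph : List (Int × List Int)) : List Int := 1 :: graph.flatMap (·.2)

theorem pvAdj_subset_allNodes (graph : List (Int × List Int)) (n m : Int)
    (h : m ∈ (pvAdj graph n).getD []) : m ∈ pvAllNodes graph := by
  rw [pvAllNodes, List.mem_cons]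
  refine Or.inr ?_
  induction graph with
  | nil => simp [pvAdj] at h
  | cons p rest ih =>
    obtain ⟨k, l⟩ := p
    simp only [pvAdj] at h
    simp only [List.flatMap_cons, List.mem_append]
    split at h
    · left; simpa using h
    · exact Or.inr (ih h)

theorem pvNodup_subset_length_le (l l' : List Int) (hn : l.Nodup) (hs : ∀ x ∈ l, x ∈ l') :
    l.length ≤ l'.length := by
  calc l.length = l.toFinset.card := (List.toFinset_card_of_nodup hn).symm
    _ ≤ l'.toFinset.card := Finset.card_le_card (fun x hx => by
        simp only [List.mem_toFinset] at hx ⊢; exact hs x hx)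
    _ ≤ l'.length := List.toFinset_card_le l'

theorem pvNodup_snoc {v : List Int} {n : Int} (hv : v.Nodup) (hn : n ∉ v) :
    (v ++ [n]).Nodup := by
  simp [List.nodup_append, hv]
  exact fun a ha e => hn (e ▸ ha)

theorem pvMem_snoc {v : List Int} {n x : Int} (hx : x ∈ v ++ [n]) : x ∈ v ∨ x = n := by
  rcases List.mem_append.1 hx with h | h
  · exact Or.inl h
  · simp at h; exact Or.inr h

-- ===== PORT A =====
-- the while loop of A; the invariant argument only feeds the termination measure
def bfsLoop (graph : List (Int × List Int)) (visited queue : List Int)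
    (h : visited.Nodup ∧ (∀ x ∈ visited, x ∈ pvAllNodes graph) ∧ (∀ x ∈ queue, x ∈ pvAllNodes graph)) :
    List Int :=
  match queue with
  | [] => visited
  | n :: rest =>
    if hn : n ∈ visited then
      bfsLoop graph visited rest ⟨h.1, h.2.1, fun x hx => h.2.2 x (List.mem_cons_of_mem _ hx)⟩
    else
      -- visited.append(n)
      match hadj : pvAdj graph n with
      | some l =>
        -- temp = sorted(set(graph[n]) - set(visited)); queue += temp
        bfsLoop graph (visited ++ [n])
          (rest ++ PySem.List.sorted (PySem.Set.diff (PySem.Set.ofList l) (visited ++ [n])) (fun x => x) false)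
          ⟨pvNodup_snoc h.1 hn,
           fun x hx => (pvMem_snoc hx).elim (h.2.1 x) (fun e => e ▸ h.2.2 n (List.mem_cons_self ..)),
           by intro x hx
              rcases List.mem_append.1 hx with h1 | h1
              · exact h.2.2 x (List.mem_cons_of_mem _ h1)
              · have hxl : x ∈ (pvAdj graph n).getD [] := by
                  rw [hadj]
                  have h2 := (PySem.List.mem_sorted _ _ _ _).1 h1
                  simp only [PySem.Set.diff, List.mem_filter] at h2
                  exact (PySem.Set.mem_ofList _ _).1 h2.1
                exact pvAdj_subset_allNodes graph n x hxl⟩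
      | none =>
        bfsLoop graph (visited ++ [n]) rest
          ⟨pvNodup_snoc h.1 hn,
           fun x hx => (pvMem_snoc hx).elim (h.2.1 x) (fun e => e ▸ h.2.2 n (List.mem_cons_self ..)),
           fun x hx => h.2.2 x (List.mem_cons_of_mem _ hx)⟩
  termination_by ((pvAllNodes graph).length + 1 - visited.length, queue.length)
  decreasing_by
  · exact Prod.Lex.right _ (by simp)
  · have hb : (visited ++ [n]).length ≤ (pvAllNodes graph).length :=
      pvNodup_subset_length_le _ _ (pvNodup_snoc h.1 hn)
        (fun x hx => (pvMem_snoc hx).elim (h.2.1 x) (fun e => e ▸ h.2.2 n (List.mem_cons_self ..)))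
    apply Prod.Lex.left
    simp at hb ⊢; omega
  · have hb : (visited ++ [n]).length ≤ (pvAllNodes graph).length :=
      pvNodup_subset_length_le _ _ (pvNodup_snoc h.1 hn)
        (fun x hx => (pvMem_snoc hx).elim (h.2.1 x) (fun e => e ▸ h.2.2 n (List.mem_cons_self ..)))
    apply Prod.Lex.left
    simp at hb ⊢; omega

def bfs (graph : List (Int × List Int)) (root : Int) : Int :=
  ((bfsLoop graph [] [1] ⟨by simp, by simp, by simp [pvAllNodes]⟩).length : Int) - 1

-- ===== PORT B =====
-- the inner 'for m in graph.get(n, ()):' loop of B: add unseen neighbours to the set, push them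
def pushNew (visited stack : List Int) : List Int → List Int × List Int
  | [] => (visited, stack)
  | m :: ms =>
    if PySem.Set.contains visited m then pushNew visited stack ms
    else pushNew (PySem.Set.add visited m) (stack ++ [m]) ms

theorem pvSet_contains_iff (v : List Int) (m : Int) : PySem.Set.contains v m = true ↔ m ∈ v := by
  simp [PySem.Set.contains, List.contains_eq_mem]

theorem pvSet_add_of_not_mem {v : List Int} {m : Int} (hm : m ∉ v) :
    PySem.Set.add v m = v ++ [m] := by
  rw [PySem.Set.add, if_neg]
  rw [pvSet_contains_iff]
  exact hm

theorem pushNew_fst_len (visited stack l : List Int) :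
    visited.length ≤ (pushNew visited stack l).1.length := by
  induction l generalizing visited stack with
  | nil => simp [pushNew]
  | cons m ms ih =>
    simp only [pushNew]
    split
    · exact ih _ _
    · rename_i hc
      have hm : m ∉ visited := fun h => hc ((pvSet_contains_iff _ _).2 h)
      rw [pvSet_add_of_not_mem hm]
      calc visited.length ≤ (visited ++ [m]).length := by simp
        _ ≤ _ := ih _ _

theorem pushNew_eq_of_fst_len (visited stack l : List Int)
    (h : (pushNew visited stack l).1.length = visited.length) :
    pushNew visited stack l = (visited, stack) := by
  induction l generalizing visited stack with
  | nil => simp [pushNew]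
  | cons m ms ih =>
    by_cases hc : PySem.Set.contains visited m = true
    · simp only [pushNew, if_pos hc] at h ⊢
      exact ih _ _ h
    · have hm : m ∉ visited := fun hx => hc ((pvSet_contains_iff _ _).2 hx)
      simp only [pushNew, if_neg hc] at h
      exfalso
      have h2 := pushNew_fst_len (PySem.Set.add visited m) (stack ++ [m]) ms
      rw [pvSet_add_of_not_mem hm] at h h2
      simp only [List.length_append, List.length_cons, List.length_nil] at h2
      omega

theorem pushNew_fst_nodup (visited stack l : List Int) (hv : visited.Nodup) :
    (pushNew visited stack l).1.Nodup := by
  induction l generalizing visited stack with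
  | nil => simpa [pushNew]
  | cons m ms ih =>
    simp only [pushNew]
    split
    · exact ih _ _ hv
    · rename_i hc
      have hm : m ∉ visited := fun hx => hc ((pvSet_contains_iff _ _).2 hx)
      rw [pvSet_add_of_not_mem hm]
      exact ih _ _ (pvNodup_snoc hv hm)

theorem pushNew_mem_fst (visited stack l : List Int) (x : Int) :
    x ∈ (pushNew visited stack l).1 ↔ x ∈ visited ∨ x ∈ l := by
  induction l generalizing visited stack with
  | nil => simp [pushNew]
  | cons m ms ih =>
    simp only [pushNew]
    split
    · rename_i hc
      have hm : m ∈ visited := (pvSet_contains_iff _ _).1 hc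
      rw [ih]
      constructor
      · rintro (h1 | h1) <;> simp [h1]
      · rintro (h1 | h1)
        · exact Or.inl h1
        · rcases List.mem_cons.1 h1 with h2 | h2
          · subst h2; exact Or.inl hm
          · exact Or.inr h2
    · rename_i hc
      have hm : m ∉ visited := fun hx => hc ((pvSet_contains_iff _ _).2 hx)
      rw [pvSet_add_of_not_mem hm, ih]
      simp [or_assoc]

theorem pushNew_mem_snd (visited stack l : List Int) (x : Int)
    (hx : x ∈ (pushNew visited stack l).2) : x ∈ stack ∨ x ∈ l := by
  induction l generalizing visited stack with
  | nil => simpa [pushNew] using hx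
  | cons m ms ih =>
    simp only [pushNew] at hx
    split at hx
    · rcases ih _ _ hx with h1 | h1
      · exact Or.inl h1
      · exact Or.inr (List.mem_cons_of_mem _ h1)
    · rcases ih _ _ hx with h1 | h1
      · rcases pvMem_snoc h1 with h2 | h2
        · exact Or.inl h2
        · exact Or.inr (h2 ▸ List.mem_cons_self ..)
      · exact Or.inr (List.mem_cons_of_mem _ h1)

-- the termination argument of dfsLoop, shared by its three decreasing_by goals
theorem pvDfs_measure (graph : List (Int × List Int)) (visited stack : List Int)
    (hv : visited.Nodup) (hva : ∀ x ∈ visited, x ∈ pvAllNodes graph) (hne : stack ≠ [])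
    (l : List Int) :
    Prod.Lex (· < ·) (· < ·)
      (((pvAllNodes graph).length + 1 - (pushNew visited stack.dropLast l).1.length,
        (pushNew visited stack.dropLast l).2.length) : ℕ × ℕ)
      ((pvAllNodes graph).length + 1 - visited.length, stack.length) := by
  by_cases hlen : (pushNew visited stack.dropLast l).1.length = visited.length
  · have he := pushNew_eq_of_fst_len visited stack.dropLast l hlen
    rw [he]
    apply Prod.Lex.right
    show stack.dropLast.length < stack.length
    have hdl : stack.dropLast.length = stack.length - 1 := List.length_dropLast
    have hpos : 0 < stack.length := List.length_pos_of_ne_nil hne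
    omega
  · have h1 := pushNew_fst_len visited stack.dropLast l
    have hb : visited.length ≤ (pvAllNodes graph).length :=
      pvNodup_subset_length_le _ _ hv hva
    apply Prod.Lex.left
    omega

-- the while loop of B; the invariant argument only feeds the termination measure
def dfsLoop (graph : List (Int × List Int)) (visited stack : List Int)
    (h : visited.Nodup ∧ (∀ x ∈ visited, x ∈ pvAllNodes graph) ∧ (∀ x ∈ stack, x ∈ pvAllNodes graph)) :
    List Int :=
  match hst : stack.getLast? with
  | none => visited
  | some n =>                                   -- n = stack.pop()
    dfsLoop graph
      (pushNew visited stack.dropLast ((pvAdj graph n).getD [])).1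
      (pushNew visited stack.dropLast ((pvAdj graph n).getD [])).2
      ⟨pushNew_fst_nodup visited stack.dropLast _ h.1,
       fun x hx => (pushNew_mem_fst visited stack.dropLast _ x |>.1 hx).elim (h.2.1 x)
         (fun hxl => pvAdj_subset_allNodes graph n x hxl),
       fun x hx => (pushNew_mem_snd visited stack.dropLast _ x hx).elim
         (fun h1 => h.2.2 x (List.dropLast_subset _ h1))
         (fun hxl => pvAdj_subset_allNodes graph n x hxl)⟩
  termination_by ((pvAllNodes graph).length + 1 - visited.length, stack.length)
  decreasing_by
    exact pvDfs_measure graph visited stack h.1 h.2.1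
      (by intro e; rw [e] at hst; simp at hst) _

def bfs_alt (graph : List (Int × List Int)) (root : Int) : Int :=
  ((dfsLoop graph [1] [1] ⟨by simp, by simp [pvAllNodes], by simp [pvAllNodes]⟩).length : Int) - 1

-- ===== PRECONDITION & SPEC =====
def Spec_bfs (graph : List (Int × List Int)) (root : Int) (out : Int) : Prop := out = bfs_alt graph root
instance (graph : List (Int × List Int)) (root : Int) (out : Int) : Decidable (Spec_bfs graph root out) := by unfold Spec_bfs; infer_instance

-- ===== CLAIM (what is proved, stated in full; the proofs are below) =====
def Claim_equal_bfs : Prop := ∀ (graph : List (Int × List Int)) (root : Int), Dom_bfs graph root → Spec_bfs graph root (bfs graph root)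


-- ===== LEMMAS AND PROOFS =====

-- reachability from node 1 along the dict's adjacency lists
inductive PvReach (graph : List (Int × List Int)) : Int → Prop
  | root : PvReach graph 1
  | step {n m : Int} : PvReach graph n → m ∈ (pvAdj graph n).getD [] → PvReach graph m

theorem pvMem_temp {l v : List Int} {x : Int} :
    x ∈ PySem.List.sorted (PySem.Set.diff (PySem.Set.ofList l) v) (fun x => x) false ↔
      (x ∈ l ∧ x ∉ v) := by
  simp [PySem.List.mem_sorted, PySem.Set.diff, List.mem_filter, PySem.Set.mem_ofList]

-- any list containing 1 and closed under adjacency contains everything reachable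
theorem pvReach_mem_of_closed (graph : List (Int × List Int)) (r : List Int)
    (h1 : 1 ∈ r) (hc : ∀ n ∈ r, ∀ m ∈ (pvAdj graph n).getD [], m ∈ r) :
    ∀ x, PvReach graph x → x ∈ r := by
  intro x hx
  induction hx with
  | root => exact h1
  | step hn hm ih => exact hc _ ih _ hm

-- A's loop: its result contains the initial visited list, is duplicate-free, consists of
-- reachable nodes, is closed under adjacency, and contains 1
theorem bfsLoop_spec (graph : List (Int × List Int)) (visited queue : List Int)
    (h : visited.Nodup ∧ (∀ x ∈ visited, x ∈ pvAllNodes graph) ∧ (∀ x ∈ queue, x ∈ pvAllNodes graph))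
    (hrV : ∀ x ∈ visited, PvReach graph x)
    (hrQ : ∀ x ∈ queue, PvReach graph x)
    (hcl : ∀ n ∈ visited, ∀ m ∈ (pvAdj graph n).getD [], m ∈ visited ∨ m ∈ queue)
    (hone : 1 ∈ visited ∨ 1 ∈ queue) :
    (∀ x ∈ visited, x ∈ bfsLoop graph visited queue h) ∧
    (bfsLoop graph visited queue h).Nodup ∧
    (∀ x ∈ bfsLoop graph visited queue h, PvReach graph x) ∧
    (∀ n ∈ bfsLoop graph visited queue h, ∀ m ∈ (pvAdj graph n).getD [], m ∈ bfsLoop graph visited queue h) ∧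
    1 ∈ bfsLoop graph visited queue h := by
  fun_induction bfsLoop graph visited queue h with
  | case1 v h1 h2 =>
    refine ⟨fun x hx => hx, h2.1, hrV, ?_, ?_⟩
    · intro n hn m hm
      exact (hcl n hn m hm).resolve_right (by simp)
    · exact hone.resolve_right (by simp)
  | case2 v n rest h1 hmem h2 ih =>
    refine ih hrV (fun x hx => hrQ x (List.mem_cons_of_mem _ hx)) ?_ ?_
    · intro p hp m hm
      rcases hcl p hp m hm with h3 | h3
      · exact Or.inl h3
      · rcases List.mem_cons.1 h3 with h4 | h4
        · exact Or.inl (by rw [h4]; exact hmem)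
        · exact Or.inr h4
    · rcases hone with h3 | h3
      · exact Or.inl h3
      · rcases List.mem_cons.1 h3 with h4 | h4
        · exact Or.inl (by rw [h4]; exact hmem)
        · exact Or.inr h4
  | case3 v n rest h1 hn l hadj h2 ih =>
    have hrn : PvReach graph n := hrQ n (List.mem_cons_self ..)
    have hrV' : ∀ x ∈ v ++ [n], PvReach graph x :=
      fun x hx => (pvMem_snoc hx).elim (hrV x) (fun e => e ▸ hrn)
    have hrQ' : ∀ x ∈ rest ++ PySem.List.sorted (PySem.Set.diff (PySem.Set.ofList l) (v ++ [n])) (fun x => x) false,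
        PvReach graph x := by
      intro x hx
      rcases List.mem_append.1 hx with h3 | h3
      · exact hrQ x (List.mem_cons_of_mem _ h3)
      · have := (pvMem_temp.1 h3).1
        exact PvReach.step hrn (by rw [hadj]; exact this)
    have hcl' : ∀ p ∈ v ++ [n], ∀ m ∈ (pvAdj graph p).getD [],
        m ∈ v ++ [n] ∨ m ∈ rest ++ PySem.List.sorted (PySem.Set.diff (PySem.Set.ofList l) (v ++ [n])) (fun x => x) false := by
      intro p hp m hm
      rcases pvMem_snoc hp with h3 | h3
      · rcases hcl p h3 m hm with h4 | h4
        · exact Or.inl (List.mem_append_left _ h4)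
        · rcases List.mem_cons.1 h4 with h5 | h5
          · exact Or.inl (by rw [h5]; simp)
          · exact Or.inr (List.mem_append_left _ h5)
      · subst h3
        rw [hadj] at hm
        by_cases hmv : m ∈ v ++ [p]
        · exact Or.inl hmv
        · exact Or.inr (List.mem_append_right _ (pvMem_temp.2 ⟨hm, hmv⟩))
    have hone' : 1 ∈ v ++ [n] ∨ 1 ∈ rest ++ PySem.List.sorted (PySem.Set.diff (PySem.Set.ofList l) (v ++ [n])) (fun x => x) false := by
      rcases hone with h3 | h3
      · exact Or.inl (List.mem_append_left _ h3)
      · rcases List.mem_cons.1 h3 with h4 | h4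
        · exact Or.inl (by rw [h4]; simp)
        · exact Or.inr (List.mem_append_left _ h4)
    obtain ⟨ihv, ihnd, ihr, ihc, ihone⟩ := ih hrV' hrQ' hcl' hone'
    exact ⟨fun x hx => ihv x (List.mem_append_left _ hx), ihnd, ihr, ihc, ihone⟩
  | case4 v n rest h1 hn hadj h2 ih =>
    have hrn : PvReach graph n := hrQ n (List.mem_cons_self ..)
    have hrV' : ∀ x ∈ v ++ [n], PvReach graph x :=
      fun x hx => (pvMem_snoc hx).elim (hrV x) (fun e => e ▸ hrn)
    have hrQ' : ∀ x ∈ rest, PvReach graph x := fun x hx => hrQ x (List.mem_cons_of_mem _ hx)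
    have hcl' : ∀ p ∈ v ++ [n], ∀ m ∈ (pvAdj graph p).getD [], m ∈ v ++ [n] ∨ m ∈ rest := by
      intro p hp m hm
      rcases pvMem_snoc hp with h3 | h3
      · rcases hcl p h3 m hm with h4 | h4
        · exact Or.inl (List.mem_append_left _ h4)
        · rcases List.mem_cons.1 h4 with h5 | h5
          · exact Or.inl (by rw [h5]; simp)
          · exact Or.inr h5
      · subst h3
        rw [hadj] at hm
        simp at hm
    have hone' : 1 ∈ v ++ [n] ∨ 1 ∈ rest := by
      rcases hone with h3 | h3
      · exact Or.inl (List.mem_append_left _ h3)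
      · rcases List.mem_cons.1 h3 with h4 | h4
        · exact Or.inl (by rw [h4]; simp)
        · exact Or.inr h4
    obtain ⟨ihv, ihnd, ihr, ihc, ihone⟩ := ih hrV' hrQ' hcl' hone'
    exact ⟨fun x hx => ihv x (List.mem_append_left _ hx), ihnd, ihr, ihc, ihone⟩



theorem pushNew_snd_mono (visited stack l : List Int) :
    ∀ x ∈ stack, x ∈ (pushNew visited stack l).2 := by
  induction l generalizing visited stack with
  | nil => simp [pushNew]
  | cons m ms ih =>
    intro x hx
    simp only [pushNew]
    split
    · exact ih _ _ x hx
    · exact ih _ _ x (List.mem_append_left _ hx)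

-- every node newly added to the visited set is also on the new stack
theorem pushNew_fst_split (visited stack l : List Int) :
    ∀ x ∈ (pushNew visited stack l).1, x ∈ visited ∨ x ∈ (pushNew visited stack l).2 := by
  induction l generalizing visited stack with
  | nil =>
    intro x hx
    simp only [pushNew] at hx
    exact Or.inl hx
  | cons m ms ih =>
    intro x hx
    by_cases hc : PySem.Set.contains visited m = true
    · simp only [pushNew, if_pos hc] at hx ⊢
      exact ih _ _ x hx
    · have hm : m ∉ visited := fun h => hc ((pvSet_contains_iff _ _).2 h)
      simp only [pushNew, if_neg hc, pvSet_add_of_not_mem hm] at hx ⊢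
      rcases ih _ _ x hx with h1 | h1
      · rcases pvMem_snoc h1 with h2 | h2
        · exact Or.inl h2
        · exact Or.inr (by rw [h2]; exact pushNew_snd_mono _ _ _ m (List.mem_append_right _ (List.mem_singleton.2 rfl)))
      · exact Or.inr h1

theorem pushNew_snd_good (visited stack l : List Int)
    (hsv : ∀ x ∈ stack, x ∈ visited) (hsn : stack.Nodup) :
    (∀ x ∈ (pushNew visited stack l).2, x ∈ (pushNew visited stack l).1) ∧
      (pushNew visited stack l).2.Nodup := by
  induction l generalizing visited stack with
  | nil => exact ⟨fun x hx => hsv x hx, hsn⟩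
  | cons m ms ih =>
    simp only [pushNew]
    split
    · exact ih _ _ hsv hsn
    · rename_i hc
      have hm : m ∉ visited := fun h => hc ((pvSet_contains_iff _ _).2 h)
      rw [pvSet_add_of_not_mem hm]
      refine ih _ _ ?_ (pvNodup_snoc hsn (fun h => hm (hsv m h)))
      intro x hx
      rcases pvMem_snoc hx with h1 | h1
      · exact List.mem_append_left _ (hsv x h1)
      · exact h1 ▸ (by simp)

-- B's loop: same five facts
theorem dfsLoop_spec (graph : List (Int × List Int)) (visited stack : List Int)
    (h : visited.Nodup ∧ (∀ x ∈ visited, x ∈ pvAllNodes graph) ∧ (∀ x ∈ stack, x ∈ pvAllNodes graph))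
    (hsv : ∀ x ∈ stack, x ∈ visited)
    (hsn : stack.Nodup)
    (hr : ∀ x ∈ visited, PvReach graph x)
    (hcl : ∀ n ∈ visited, n ∉ stack → ∀ m ∈ (pvAdj graph n).getD [], m ∈ visited)
    (hone : 1 ∈ visited) :
    (∀ x ∈ visited, x ∈ dfsLoop graph visited stack h) ∧
    (dfsLoop graph visited stack h).Nodup ∧
    (∀ x ∈ dfsLoop graph visited stack h, PvReach graph x) ∧
    (∀ n ∈ dfsLoop graph visited stack h, ∀ m ∈ (pvAdj graph n).getD [], m ∈ dfsLoop graph visited stack h) ∧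
    1 ∈ dfsLoop graph visited stack h := by
  fun_induction dfsLoop graph visited stack h with
  | case1 v st h1 hst =>
    have hnil : st = [] := List.getLast?_eq_none_iff.1 hst
    subst hnil
    refine ⟨fun x hx => hx, h1.1, hr, ?_, hone⟩
    intro n hn m hm
    exact hcl n hn (by simp) m hm
  | case2 v st h1 n hst ih =>
    have hne : st ≠ [] := by intro e; rw [e] at hst; simp at hst
    have hn_last : st.getLast hne = n := by
      rw [List.getLast?_eq_some_getLast hne] at hst
      exact Option.some.inj hst
    have hsplit : st.dropLast ++ [n] = st := by
      rw [← hn_last]; exact List.dropLast_append_getLast hne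
    have hnst : n ∈ st := by rw [← hsplit]; simp
    have hnv : n ∈ v := hsv n hnst
    have hdv : ∀ x ∈ st.dropLast, x ∈ v := fun x hx => hsv x (List.dropLast_subset _ hx)
    have hdn : st.dropLast.Nodup := hsn.sublist (List.dropLast_sublist st)
    obtain ⟨hg1, hg2⟩ := pushNew_snd_good v st.dropLast ((pvAdj graph n).getD []) hdv hdn
    have hr' : ∀ x ∈ (pushNew v st.dropLast ((pvAdj graph n).getD [])).1, PvReach graph x := by
      intro x hx
      rcases (pushNew_mem_fst _ _ _ x).1 hx with h2 | h2
      · exact hr x h2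
      · exact PvReach.step (hr n hnv) h2
    have hcl' : ∀ q ∈ (pushNew v st.dropLast ((pvAdj graph n).getD [])).1,
        q ∉ (pushNew v st.dropLast ((pvAdj graph n).getD [])).2 →
        ∀ m ∈ (pvAdj graph q).getD [], m ∈ (pushNew v st.dropLast ((pvAdj graph n).getD [])).1 := by
      intro q hq hqs m hm
      have hqv : q ∈ v := by
        rcases pushNew_fst_split v st.dropLast _ q hq with h2 | h2
        · exact h2
        · exact absurd h2 hqs
      by_cases hqn : q = n
      · subst hqn
        exact (pushNew_mem_fst _ _ _ m).2 (Or.inr hm)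
      · have hqd : q ∉ st.dropLast := fun h2 => hqs (pushNew_snd_mono _ _ _ q h2)
        have hqst : q ∉ st := by
          rw [← hsplit]
          intro h2
          rcases pvMem_snoc h2 with h3 | h3
          · exact hqd h3
          · exact hqn h3
        exact (pushNew_mem_fst _ _ _ m).2 (Or.inl (hcl q hqv hqst m hm))
    have hone' : 1 ∈ (pushNew v st.dropLast ((pvAdj graph n).getD [])).1 :=
      (pushNew_mem_fst _ _ _ 1).2 (Or.inl hone)
    obtain ⟨ihv, ihnd, ihr, ihc, ihone⟩ := ih hg1 hg2 hr' hcl' hone'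
    exact ⟨fun x hx => ihv x ((pushNew_mem_fst _ _ _ x).2 (Or.inl hx)), ihnd, ihr, ihc, ihone⟩



-- ===== VERDICT (by name: the statement is the Claim_ definition above) =====
theorem bfs_spec : Claim_equal_bfs := by
  unfold Claim_equal_bfs
  intro graph root _
  unfold Spec_bfs bfs bfs_alt
  obtain ⟨_, hAnd, hAr, hAc, hA1⟩ := bfsLoop_spec graph [] [1] _
    (by simp) (by intro x hx; simp at hx; subst hx; exact PvReach.root) (by simp) (by simp)
  obtain ⟨_, hBnd, hBr, hBc, hB1⟩ := dfsLoop_spec graph [1] [1] _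
    (by simp) (by simp) (by intro x hx; simp at hx; subst hx; exact PvReach.root)
    (by intro n hn hns; simp at hn; simp [hn] at hns) (by simp)
  have hperm := (List.perm_ext_iff_of_nodup hAnd hBnd).2 (fun a => by
    constructor
    · intro ha
      exact pvReach_mem_of_closed graph _ hB1 hBc a (hAr a ha)
    · intro ha
      exact pvReach_mem_of_closed graph _ hA1 hAc a (hBr a ha))
  rw [hperm.length_eq]
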